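-- pv_equiv track=rewrite | github.com/ArifMariem/FinancialDocOCR | OCR_PROCESS/table_reconstruction.py | split_list_by_h_threshold
-- ===== SOURCE A (Python) =====
-- def split_list_by_h_threshold(lst, threshold):
--     result = []
--     current_group = [lst[0]]
--     for i in range(1, len(lst)):
--         prev_tuple = lst[i-1]
--         curr_tuple = lst[i]
--         if abs(prev_tuple[1][3] - curr_tuple[1][3]) <= threshold:
--             current_group.append(curr_tuple)
--         else:
--             result.append(current_group)
--             current_group = [curr_tuple]
--     result.append(current_group)
--     return result
-- ===== SOURCE B (Python) =====
-- def split_list_by_h_threshold(lst, threshold):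
--     if not lst:
--         return []
--     cuts = [i for i in range(1, len(lst)) if abs(lst[i-1][1][3] - lst[i][1][3]) > threshold]
--     bounds = [0] + cuts + [len(lst)]
--     return [lst[a:b] for a, b in zip(bounds, bounds[1:])]
-- ===== Notes on version B (the rewrite author's own statement) =====
-- stated objective: alternative
-- what changed: Instead of A's single stateful pass that grows a current_group accumulator, B first computes the list of cut indices where the height difference exceeds the threshold and then materialises the groups as slices between consecutive boundaries.
import Mathlib
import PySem

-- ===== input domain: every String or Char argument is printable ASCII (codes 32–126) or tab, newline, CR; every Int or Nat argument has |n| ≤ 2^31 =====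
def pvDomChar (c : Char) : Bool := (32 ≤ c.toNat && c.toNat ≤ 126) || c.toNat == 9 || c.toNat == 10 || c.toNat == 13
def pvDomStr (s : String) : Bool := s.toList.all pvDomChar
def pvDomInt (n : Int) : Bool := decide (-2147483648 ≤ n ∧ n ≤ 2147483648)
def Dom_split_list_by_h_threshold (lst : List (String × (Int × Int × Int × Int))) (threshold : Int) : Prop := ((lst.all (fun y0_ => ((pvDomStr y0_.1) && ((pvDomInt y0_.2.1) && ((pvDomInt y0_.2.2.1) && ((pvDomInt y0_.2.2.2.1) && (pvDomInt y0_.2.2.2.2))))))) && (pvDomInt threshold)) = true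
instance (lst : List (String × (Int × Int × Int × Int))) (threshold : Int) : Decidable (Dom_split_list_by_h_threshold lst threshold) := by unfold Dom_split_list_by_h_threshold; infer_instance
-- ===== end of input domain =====

-- B replaces A's stateful accumulator pass by a cut-index + slices decomposition (same value on nonempty input; on [] A raises, B returns []).

-- ===== PORT A =====
-- Literal transliteration of A: result/current_group accumulator pair, loop over range(1, len(lst)).
def split_list_by_h_threshold (lst : List (String × (Int × Int × Int × Int))) (threshold : Int) : List (List (String × (Int × Int × Int × Int))) :=
  match lst with
  | [] => []   -- lst[0] raises IndexError here: excluded by Pre_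
  | x :: _ =>
    let st := (PySem.List.pyRange 1 (PySem.List.len lst) 1).foldl
      (fun (st : List (List (String × (Int × Int × Int × Int))) × List (String × (Int × Int × Int × Int))) i =>
        let prev := PySem.List.pyGetD lst (i - 1) x
        let curr := PySem.List.pyGetD lst i x
        if |prev.2.2.2.2 - curr.2.2.2.2| ≤ threshold then
          (st.1, st.2 ++ [curr])
        else
          (st.1 ++ [st.2], [curr]))
      ([], [x])
    st.1 ++ [st.2]

-- ===== PORT B =====
-- Literal transliteration of B (Source B): cut indices, bounds list, slices between consecutive bounds.
def split_list_by_h_threshold_alt (lst : List (String × (Int × Int × Int × Int))) (threshold : Int) : List (List (String × (Int × Int × Int × Int))) :=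
  match lst with
  | [] => []
  | x :: _ =>
    let cuts := (PySem.List.pyRange 1 (PySem.List.len lst) 1).filter
      (fun i => threshold < |(PySem.List.pyGetD lst (i - 1) x).2.2.2.2 - (PySem.List.pyGetD lst i x).2.2.2.2|)
    let bounds : List Int := 0 :: (cuts ++ [PySem.List.len lst])
    (bounds.zip bounds.tail).map (fun p => PySem.List.slice lst (some p.1) (some p.2))

-- ===== PRECONDITION & SPEC =====
-- Pre_ excludes only the empty list, on which A's unconditional lst[0] raises IndexError.
def Pre_split_list_by_h_threshold (lst : List (String × (Int × Int × Int × Int))) (threshold : Int) : Prop := lst ≠ []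
instance (lst : List (String × (Int × Int × Int × Int))) (threshold : Int) : Decidable (Pre_split_list_by_h_threshold lst threshold) := by unfold Pre_split_list_by_h_threshold; infer_instance
def pvWitness_split_list_by_h_threshold : (List (String × (Int × Int × Int × Int))) × Int :=
  ([("a", (0, 0, 0, 5)), ("b", (0, 0, 0, 7)), ("c", (0, 0, 0, 20))], 3)

def Spec_split_list_by_h_threshold (lst : List (String × (Int × Int × Int × Int))) (threshold : Int) (out : List (List (String × (Int × Int × Int × Int)))) : Prop := out = split_list_by_h_threshold_alt lst threshold
instance (lst : List (String × (Int × Int × Int × Int))) (threshold : Int) (out : List (List (String × (Int × Int × Int × Int)))) : Decidable (Spec_split_list_by_h_threshold lst threshold out) := by unfold Spec_split_list_by_h_threshold; infer_instance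

-- ===== CLAIM (what is proved, stated in full; the proofs are below) =====
def Claim_equal_split_list_by_h_threshold : Prop := ∀ (lst : List (String × (Int × Int × Int × Int))) (threshold : Int), Dom_split_list_by_h_threshold lst threshold → Pre_split_list_by_h_threshold lst threshold → Spec_split_list_by_h_threshold lst threshold (split_list_by_h_threshold lst threshold)

-- ===== LEMMAS AND PROOFS =====

-- the element type, abbreviated for the proofs
abbrev PvT : Type := String × (Int × Int × Int × Int)

-- segments of lst between consecutive bounds a :: bs (B's zip-of-bounds, in recursive form)
def pvSegs (lst : List PvT) : Int → List Int → List (List PvT)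
  | _, [] => []
  | a, b :: bs => PySem.List.slice lst (some a) (some b) :: pvSegs lst b bs

theorem pvSegs_nil (lst : List PvT) (a : Int) : pvSegs lst a [] = [] := rfl

theorem pvSegs_zip (lst : List PvT) (bs : List Int) (a : Int) :
    (((a :: bs).zip bs).map (fun p => PySem.List.slice lst (some p.1) (some p.2))) = pvSegs lst a bs := by
  induction bs generalizing a with
  | nil => simp [pvSegs]
  | cons b bs ih => simp [pvSegs, List.zip_cons_cons, ih]

theorem pvSegs_append_last (lst : List PvT) (cs : List Int) (a n : Int) :
    pvSegs lst a (cs ++ [n]) = pvSegs lst a cs ++ [PySem.List.slice lst (some (cs.getLastD a)) (some n)] := by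
  induction cs generalizing a with
  | nil => simp [pvSegs]
  | cons c cs ih => simp only [List.cons_append, pvSegs, ih, List.getLastD_cons]

-- a slice by one more index appends one element
theorem pvSlice_snoc (lst : List PvT) (a : Int) (m : Nat) (ha : 0 ≤ a) (ham : a ≤ (m : Int))
    (hm : m < lst.length) :
    PySem.List.slice lst (some a) (some ((m : Int) + 1)) =
      PySem.List.slice lst (some a) (some (m : Int)) ++ [lst[m]] := by
  rw [PySem.List.slice_toNat, PySem.List.slice_toNat]
  · have h1 : ((m : Int) + 1).toNat = m + 1 := by omega
    have h2 : ((m : Int)).toNat = m := by omega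
    have h3 : m + 1 - a.toNat = (m - a.toNat) + 1 := by omega
    rw [h1, h2, h3, List.take_add_one]
    have h4 : (lst.drop a.toNat)[m - a.toNat]? = some lst[m] := by
      rw [List.getElem?_drop]
      have : a.toNat + (m - a.toNat) = m := by omega
      rw [this, List.getElem?_eq_getElem hm]
    simp [h4]
  all_goals omega

theorem pvSlice_singleton (lst : List PvT) (m : Nat) (hm : m < lst.length) :
    PySem.List.slice lst (some (m : Int)) (some ((m : Int) + 1)) = [lst[m]] := by
  rw [PySem.List.slice_toNat]
  · have h1 : ((m : Int) + 1).toNat = m + 1 := by omega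
    have h2 : ((m : Int)).toNat = m := by omega
    rw [h1, h2]
    have h3 : m + 1 - m = 1 := by omega
    rw [h3, List.drop_eq_getElem_cons hm, List.take_succ_cons, List.take_zero]
  all_goals omega

-- the last bound so far is in range
theorem pvLastD_bounds {cs : List Int} {a b : Int} (h : ∀ c ∈ cs, a ≤ c ∧ c < b) (hab : a ≤ b) :
    a ≤ cs.getLastD a ∧ cs.getLastD a ≤ b := by
  cases cs with
  | nil => simp; omega
  | cons c cs =>
    have hm : (c :: cs).getLast (by simp) ∈ c :: cs := List.getLast_mem _
    have := h _ hm
    rw [List.getLastD_eq_getLast?, List.getLast?_eq_some_getLast (by simp)]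
    simp only [Option.getD_some]
    omega

-- the cut indices among 1..m-1 (B's comprehension, truncated at m)
def pvCuts (x : PvT) (rest : List PvT) (t : Int) (m : Nat) : List Int :=
  (PySem.List.pyRange 1 (m : Int) 1).filter
    (fun i => t < |(PySem.List.pyGetD (x :: rest) (i - 1) x).2.2.2.2 - (PySem.List.pyGetD (x :: rest) i x).2.2.2.2|)

theorem pvCuts_mem (x : PvT) (rest : List PvT) (t : Int) (m : Nat) :
    ∀ c ∈ pvCuts x rest t m, 0 ≤ c ∧ c < (m : Int) := by
  intro c hc
  have h := (List.mem_filter.mp hc).1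
  have := PySem.List.mem_pyRange_one.mp h
  omega

-- the loop invariant: after processing indices 1..m-1, A's state is (finished segments, current slice)
theorem pvInv (x : PvT) (rest : List PvT) (t : Int) (m : Nat) (h1 : 1 ≤ m)
    (h2 : m ≤ (x :: rest).length) :
    ((PySem.List.pyRange 1 (m : Int) 1).foldl
      (fun (st : List (List PvT) × List PvT) i =>
        let prev := PySem.List.pyGetD (x :: rest) (i - 1) x
        let curr := PySem.List.pyGetD (x :: rest) i x
        if |prev.2.2.2.2 - curr.2.2.2.2| ≤ t then
          (st.1, st.2 ++ [curr])
        else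
          (st.1 ++ [st.2], [curr]))
      ([], [x])) =
    (pvSegs (x :: rest) 0 (pvCuts x rest t m),
     PySem.List.slice (x :: rest) (some ((pvCuts x rest t m).getLastD 0)) (some (m : Int))) := by
  induction m with
  | zero => omega
  | succ m ih =>
    rcases Nat.eq_or_lt_of_le h1 with hbase | hstep
    · -- m + 1 = 1 : no iterations yet
      have hm0 : m = 0 := by omega
      subst hm0
      have e : ((0 + 1 : Nat) : Int) = 1 := by norm_num
      unfold pvCuts
      rw [e, PySem.List.pyRange_one_eq_nil (le_refl (1:Int))]
      simp only [List.foldl_nil, List.filter_nil, List.getLastD_nil, pvSegs_nil]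
      rw [PySem.List.slice_toNat]
      · simp
      all_goals omega
    · -- one more iteration, index m (with 1 ≤ m)
      have hm1 : 1 ≤ m := by omega
      have hmn : m < (x :: rest).length := by omega
      have hc1 : ((m + 1 : Nat) : Int) = (m : Int) + 1 := by push_cast; ring
      have hrange : PySem.List.pyRange 1 ((m : Int) + 1) 1 =
          PySem.List.pyRange 1 (m : Int) 1 ++ [(m : Int)] :=
        PySem.List.pyRange_one_succ_right (by omega)
      have hprev : PySem.List.pyGetD (x :: rest) ((m : Int) - 1) x = (x :: rest)[m - 1] := by
        have e1 : ((m : Int) - 1) = ((m - 1 : Nat) : Int) := by omega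
        rw [e1, PySem.List.pyGetD_natCast, List.getD_eq_getElem _ _ (by omega)]
      have hcurr : PySem.List.pyGetD (x :: rest) (m : Int) x = (x :: rest)[m] := by
        rw [PySem.List.pyGetD_natCast, List.getD_eq_getElem _ _ hmn]
      have hlb := pvLastD_bounds (pvCuts_mem x rest t m) (a := 0) (b := (m : Int)) (by omega)
      by_cases hcond : |((x :: rest)[m - 1]).2.2.2.2 - ((x :: rest)[m]).2.2.2.2| ≤ t
      · -- heights close: element m joins the current group; no new cut
        have hfilt : pvCuts x rest t (m + 1) = pvCuts x rest t m := by
          unfold pvCuts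
          rw [hc1, hrange, List.filter_append]
          simp only [List.filter_cons, List.filter_nil, hprev, hcurr,
            decide_eq_true_eq]
          rw [if_neg (by omega)]
          simp
        rw [hc1, hrange, List.foldl_append, ih (by omega) (by omega), List.foldl_cons, List.foldl_nil]
        simp only [hprev, hcurr, hfilt]
        rw [if_pos hcond]
        rw [pvSlice_snoc (x :: rest) _ m hlb.1 hlb.2 hmn]
      · -- heights far apart: current group is closed at cut m
        have hfilt : pvCuts x rest t (m + 1) = pvCuts x rest t m ++ [(m : Int)] := by
          unfold pvCuts
          rw [hc1, hrange, List.filter_append]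
          simp only [List.filter_cons, List.filter_nil, hprev, hcurr,
            decide_eq_true_eq]
          rw [if_pos (by omega)]
        rw [hc1, hrange, List.foldl_append, ih (by omega) (by omega), List.foldl_cons, List.foldl_nil]
        simp only [hprev, hcurr, hfilt]
        rw [if_neg hcond]
        rw [pvSegs_append_last, List.getLastD_concat,
          pvSlice_singleton (x :: rest) m hmn]

-- ===== VERDICT (by name: the statement is the Claim_ definition above) =====
theorem split_list_by_h_threshold_spec : Claim_equal_split_list_by_h_threshold := by
  intro lst t _ hpre
  unfold Spec_split_list_by_h_threshold
  match lst with
  | [] => exact absurd rfl hpre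
  | x :: rest =>
    show split_list_by_h_threshold (x :: rest) t = split_list_by_h_threshold_alt (x :: rest) t
    simp only [split_list_by_h_threshold, split_list_by_h_threshold_alt, PySem.List.len_eq]
    rw [pvInv x rest t (x :: rest).length (by simp) (le_refl _)]
    rw [List.tail_cons, pvSegs_zip, pvSegs_append_last]
    rfl
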